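-- pv_equiv track=rewrite | github.com/fragn0t1x/ozon-warehouse-saas | backend/app/services/sync_service.py | build_unique_string_index
-- ===== SOURCE A (Python) =====
-- from collections import defaultdict
-- from typing import Any, Dict, Iterable, List, Optional, Set
--
-- def normalize_optional_string(value: Any) -> str | None:
--     if value is None:
--         return None
--     normalized = str(value).strip()
--     if not normalized:
--         return None
--     if normalized.lower() in {"none", "null"}:
--         return None
--     return normalized
--
-- def build_unique_string_index(rows: list[tuple[str | None, int]]) -> dict[str, int]:
--     candidates: dict[str, set[int]] = defaultdict(set)
--     for raw_key, row_id in rows: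
--         key = normalize_optional_string(raw_key)
--         if not key:
--             continue
--         candidates[key].add(int(row_id))
--     return {key: next(iter(ids)) for key, ids in candidates.items() if len(ids) == 1}
-- ===== SOURCE B (Python) =====
-- def build_unique_string_index(rows):
--     cleaned = []
--     for raw, rid in rows:
--         if raw is None:
--             continue
--         key = str(raw).strip()
--         if key and key.lower() not in ("none", "null"):
--             cleaned.append((key, int(rid)))
--     out = {}
--     while cleaned:
--         (key, rid), rest = cleaned[0], cleaned[1:]
--         if all(r == rid for k, r in rest if k == key):
--             out[key] = rid
--         cleaned = [(k, r) for k, r in rest if k != key]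
--     return out
-- ===== Notes on version B (the rewrite author's own statement) =====
-- stated objective: alternative
-- what changed: A accumulates a dict of per-key int sets in one hashed pass and post-filters singleton sets; B first materializes the normalized (key,id) list and then repeatedly peels off the head key, deciding uniqueness by scanning that key's occurrences and filtering them out, using no dict/set accumulator at all.
import Mathlib
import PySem

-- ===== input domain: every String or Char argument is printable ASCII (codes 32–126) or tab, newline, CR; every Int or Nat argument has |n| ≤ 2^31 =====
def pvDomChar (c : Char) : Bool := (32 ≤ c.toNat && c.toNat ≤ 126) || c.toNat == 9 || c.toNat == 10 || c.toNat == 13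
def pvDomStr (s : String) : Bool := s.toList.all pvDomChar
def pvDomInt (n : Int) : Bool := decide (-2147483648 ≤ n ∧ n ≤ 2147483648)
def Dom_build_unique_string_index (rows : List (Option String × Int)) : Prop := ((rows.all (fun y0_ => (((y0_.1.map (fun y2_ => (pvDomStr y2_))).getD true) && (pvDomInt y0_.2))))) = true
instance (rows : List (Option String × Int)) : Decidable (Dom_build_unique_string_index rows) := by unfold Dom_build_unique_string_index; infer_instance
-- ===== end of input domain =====

-- B replaces A's single hashed pass (dict of per-key int sets, post-filtered for singletons) by a
-- staged peel-off scan: materialize the normalized (key, id) list, then repeatedly take the head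
-- key, decide uniqueness by scanning its occurrences and filter them out — no dict/set accumulator
-- (objective: alternative decomposition, not claimed faster).

-- ===== PORT A =====
def pvNormalizeOptionalString (value : Option String) : Option String :=
  match value with
  | none => none
  | some v =>
    let normalized := PySem.Str.strip v
    if PySem.Str.len normalized = 0 then none
    else if PySem.Str.lower normalized = "none" ∨ PySem.Str.lower normalized = "null" then none
    else some normalized

def pvStepA (d : PySem.Dict String (PySem.Set Int)) (row : Option String × Int) : PySem.Dict String (PySem.Set Int) :=
  match pvNormalizeOptionalString row.1 with
  | none => d
  | some key => d.modify key PySem.Set.empty (fun s => PySem.Set.add s row.2)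

def build_unique_string_index (rows : List (Option String × Int)) : List (String × Int) :=
  let candidates := rows.foldl pvStepA PySem.Dict.empty
  (candidates.items.filter (fun kv => kv.2.length == 1)).map (fun kv => (kv.1, kv.2.headD 0))

-- ===== PORT B =====
def pvCleanStep (acc : List (String × Int)) (row : Option String × Int) : List (String × Int) :=
  match row.1 with
  | none => acc
  | some raw =>
    let key := PySem.Str.strip raw
    if PySem.Str.len key ≠ 0 ∧ PySem.Str.lower key ≠ "none" ∧ PySem.Str.lower key ≠ "null"
    then acc ++ [(key, row.2)] else acc

def pvSift : List (String × Int) → List (String × Int)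
  | [] => []
  | (k, r) :: rest =>
    if (rest.filter (fun kr => kr.1 == k)).all (fun kr => kr.2 == r)
    then (k, r) :: pvSift (rest.filter (fun kr => kr.1 != k))
    else pvSift (rest.filter (fun kr => kr.1 != k))
termination_by l => l.length
decreasing_by all_goals
  (simp only [List.length_cons, List.length_unattach]
   exact Nat.lt_succ_of_le (le_trans (List.length_filter_le _ _) (by simp)))

def build_unique_string_index_alt (rows : List (Option String × Int)) : List (String × Int) :=
  pvSift (rows.foldl pvCleanStep [])

-- ===== PRECONDITION & SPEC =====
def Spec_build_unique_string_index (rows : List (Option String × Int)) (out : List (String × Int)) : Prop := out = build_unique_string_index_alt rows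
instance (rows : List (Option String × Int)) (out : List (String × Int)) : Decidable (Spec_build_unique_string_index rows out) := by unfold Spec_build_unique_string_index; infer_instance

-- ===== CLAIM (what is proved, stated in full; the proofs are below) =====
def Claim_equal_build_unique_string_index : Prop := ∀ (rows : List (Option String × Int)), Dom_build_unique_string_index rows → Spec_build_unique_string_index rows (build_unique_string_index rows)

-- ===== LEMMAS AND PROOFS =====

-- the normalized (key, id) of one row, shared vocabulary of the proofs
def pvNormPair (row : Option String × Int) : Option (String × Int) :=
  (pvNormalizeOptionalString row.1).map (fun k => (k, row.2))

def pvStep2 (d : PySem.Dict String (PySem.Set Int)) (kv : String × Int) : PySem.Dict String (PySem.Set Int) :=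
  d.modify kv.1 PySem.Set.empty (fun s => PySem.Set.add s kv.2)

def pvIdsOf (k : String) (l : List (String × Int)) : List Int :=
  (l.filter (fun kr => kr.1 == k)).map Prod.snd

def pvEmit (l : List (String × Int)) (k : String) : Option (String × Int) :=
  if (PySem.Set.ofList (pvIdsOf k l)).length == 1
  then some (k, (PySem.Set.ofList (pvIdsOf k l)).headD 0) else none

def pvAgood (l : List (String × Int)) : List (String × Int) :=
  (PySem.Set.ofList (l.map Prod.fst)).filterMap (pvEmit l)

theorem pvCleanEq (rows : List (Option String × Int)) (acc : List (String × Int)) :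
    rows.foldl pvCleanStep acc = acc ++ rows.filterMap pvNormPair := by
  induction rows generalizing acc with
  | nil => simp
  | cons row rest ih =>
    obtain ⟨raw0, v⟩ := row
    cases raw0 with
    | none => simp [pvCleanStep, pvNormPair, pvNormalizeOptionalString, ih]
    | some raw =>
      by_cases h0 : PySem.Chars.strip raw.toList = []
      · simp [pvCleanStep, pvNormPair, pvNormalizeOptionalString, h0, ih]
      · by_cases hn : PySem.Str.lower (PySem.Str.strip raw) = "none"
        · simp [pvCleanStep, pvNormPair, pvNormalizeOptionalString, h0, hn, ih]
        · by_cases hl : PySem.Str.lower (PySem.Str.strip raw) = "null"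
          · simp [pvCleanStep, pvNormPair, pvNormalizeOptionalString, h0, hl, ih]
          · simp [pvCleanStep, pvNormPair, pvNormalizeOptionalString, h0, hn, hl, ih]

theorem pvStepAEq (rows : List (Option String × Int)) (d : PySem.Dict String (PySem.Set Int)) :
    rows.foldl pvStepA d = (rows.filterMap pvNormPair).foldl pvStep2 d := by
  induction rows generalizing d with
  | nil => rfl
  | cons row rest ih =>
    cases h : pvNormalizeOptionalString row.1 with
    | none => simp [pvStepA, pvNormPair, h, ih]
    | some key => simp [pvStepA, pvNormPair, pvStep2, h, ih]

theorem pvKeysFold (l : List (String × Int)) (d : PySem.Dict String (PySem.Set Int)) :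
    (l.foldl pvStep2 d).keys = PySem.Set.update d.keys (l.map Prod.fst) := by
  have h := PySem.Dict.keys_foldl_modify_key l (Prod.fst : String × Int → String)
    PySem.Set.empty (fun _ kv s => PySem.Set.add s kv.2) d
  simpa [pvStep2] using h

theorem pvGetDFold (l : List (String × Int)) (d : PySem.Dict String (PySem.Set Int)) (k : String) :
    (l.foldl pvStep2 d).getD k PySem.Set.empty
      = (pvIdsOf k l).foldl PySem.Set.add (d.getD k PySem.Set.empty) := by
  induction l generalizing d with
  | nil => rfl
  | cons kv t ih =>
    obtain ⟨k', v⟩ := kv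
    by_cases hk : k' = k
    · subst hk
      simp only [List.foldl_cons, ih, pvStep2, pvIdsOf, List.filter_cons]
      simp [PySem.Dict.getD_modify_self]
    · have hne : ¬ (k' == k) = true := by simp [hk]
      simp only [List.foldl_cons, ih, pvStep2, pvIdsOf, List.filter_cons, hne]
      simp only [ite_false, Bool.false_eq_true]
      rw [PySem.Dict.getD_modify_of_ne]
      intro he; exact hk he.symm

-- Set.add peeled off a fresh head element
theorem pvAddCons {α : Type} [BEq α] [LawfulBEq α] (xs : List α) (x : α) (s : List α)
    (hx : x ∉ xs) : List.foldl PySem.Set.add (x :: s) xs = x :: List.foldl PySem.Set.add s xs := by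
  induction xs generalizing s with
  | nil => rfl
  | cons a t ih =>
    have hax : a ≠ x := fun he => hx (he ▸ List.mem_cons_self)
    have hx' : x ∉ t := fun h => hx (List.mem_cons_of_mem a h)
    have hstep : PySem.Set.add (x :: s) a = x :: PySem.Set.add s a := by
      simp only [PySem.Set.add, PySem.Set.contains_eq_listContains, List.contains_cons]
      have hb : (a == x) = false := by simp [hax]
      rw [hb]
      simp only [Bool.false_or]
      split <;> rfl
    simp only [List.foldl_cons, hstep, ih _ hx']

theorem pvAddFilter {α : Type} [BEq α] [LawfulBEq α] (xs : List α) (s : List α) (x : α)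
    (hx : x ∈ s) : List.foldl PySem.Set.add s xs
      = List.foldl PySem.Set.add s (xs.filter (fun y => !(y == x))) := by
  induction xs generalizing s with
  | nil => rfl
  | cons a t ih =>
    by_cases ha : a = x
    · subst ha
      have hadd : PySem.Set.add s a = s := PySem.Set.add_of_mem hx
      simp only [List.foldl_cons, List.filter_cons, beq_self_eq_true, Bool.not_true, hadd]
      simp only [ite_false, Bool.false_eq_true]
      exact ih s hx
    · have hmem : x ∈ PySem.Set.add s a := by
        rw [PySem.Set.mem_add]; exact Or.inl hx
      have hb : (!(a == x)) = true := by simp [ha]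
      simp only [List.foldl_cons, List.filter_cons, hb, if_true, List.foldl_cons]
      exact ih _ hmem

theorem pvOfListCons {α : Type} [BEq α] [LawfulBEq α] (x : α) (xs : List α) :
    PySem.Set.ofList (x :: xs) = x :: PySem.Set.ofList (xs.filter (fun y => !(y == x))) := by
  have h1 : PySem.Set.ofList (x :: xs) = List.foldl PySem.Set.add [x] xs := by
    rw [PySem.Set.ofList_eq_foldl]
    rfl
  have hx : x ∈ [x] := List.mem_singleton.2 rfl
  have hnot : x ∉ xs.filter (fun y => !(y == x)) := by
    intro h
    have := List.of_mem_filter h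
    simp at this
  rw [h1, pvAddFilter xs [x] x hx, pvAddCons _ x [] hnot, PySem.Set.ofList_eq_foldl]

theorem pvOfListNil {α : Type} [BEq α] [LawfulBEq α] (xs : List α) :
    PySem.Set.ofList xs = [] ↔ xs = [] := by
  cases xs with
  | nil => simp
  | cons a t => rw [pvOfListCons]; simp

theorem pvFuse (ks : List String) (f : String → PySem.Set Int) (l : List (String × Int))
    (hf : ∀ k, f k = PySem.Set.ofList (pvIdsOf k l)) :
    ((ks.map (fun k => (k, f k))).filter (fun kv => kv.2.length == 1)).map
        (fun kv => (kv.1, kv.2.headD 0))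
      = ks.filterMap (pvEmit l) := by
  induction ks with
  | nil => rfl
  | cons k t ih =>
    have he : pvEmit l k = if ((f k).length == 1) then some (k, (f k).headD 0) else none := by
      unfold pvEmit
      simp only [← hf]
    rw [List.map_cons, List.filter_cons, List.filterMap_cons, he]
    by_cases h : ((f k).length == 1) = true
    · simp only [h, if_true, List.map_cons, ih]
    · simp only [h]
      simpa using ih

theorem pvAoutEq (rows : List (Option String × Int)) :
    build_unique_string_index rows = pvAgood (rows.filterMap pvNormPair) := by
  set l := rows.filterMap pvNormPair with hl
  have hfold : rows.foldl pvStepA PySem.Dict.empty = l.foldl pvStep2 PySem.Dict.empty :=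
    pvStepAEq rows _
  have hkeys : (l.foldl pvStep2 PySem.Dict.empty).keys = PySem.Set.ofList (l.map Prod.fst) := by
    rw [pvKeysFold]
    rw [show (PySem.Dict.empty : PySem.Dict String (PySem.Set Int)).keys = [] from rfl]
    exact PySem.Set.update_nil_left _
  have hnd : (l.foldl pvStep2 PySem.Dict.empty).keys.Nodup := by
    rw [hkeys]; exact PySem.Set.nodup_ofList _
  have hget : ∀ k, (l.foldl pvStep2 PySem.Dict.empty).getD k PySem.Set.empty
      = PySem.Set.ofList (pvIdsOf k l) := by
    intro k
    rw [pvGetDFold, PySem.Set.ofList_eq_foldl]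
    rfl
  have hA : build_unique_string_index rows
      = (((rows.foldl pvStepA PySem.Dict.empty).items.filter (fun kv => kv.2.length == 1)).map
          (fun kv => (kv.1, kv.2.headD 0))) := rfl
  rw [hA, hfold, PySem.Dict.items_eq_map_keys _ hnd PySem.Set.empty, hkeys]
  exact pvFuse _ _ l hget

theorem pvIdsFilterNe (k k' : String) (t : List (String × Int)) (h : k' ≠ k) :
    pvIdsOf k' (t.filter (fun kr => kr.1 != k)) = pvIdsOf k' t := by
  unfold pvIdsOf
  rw [List.filter_filter]
  congr 1
  apply List.filter_congr
  intro kr _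
  by_cases hk : kr.1 = k'
  · simp [hk, h]
  · simp [hk]

theorem pvMainAux : ∀ (n : Nat) (l : List (String × Int)), l.length ≤ n → pvAgood l = pvSift l := by
  intro n
  induction n with
  | zero =>
    intro l hl
    have h0 : l = [] := List.length_eq_zero_iff.1 (Nat.le_zero.1 hl)
    subst h0
    simp [pvAgood, pvSift]
  | succ n ih =>
    intro l hl
    cases l with
    | nil => simp [pvAgood, pvSift]
    | cons hd t =>
      obtain ⟨k, r⟩ := hd
      have hlen : (t.filter (fun kr => kr.1 != k)).length ≤ n := by
        have h1 := List.length_filter_le (fun kr => kr.1 != k) t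
        simp only [List.length_cons] at hl
        omega
      -- key list of the cons, peeled
      have hkeys : PySem.Set.ofList (((k, r) :: t).map Prod.fst)
          = k :: PySem.Set.ofList ((t.filter (fun kr => kr.1 != k)).map Prod.fst) := by
        rw [List.map_cons, pvOfListCons]
        congr 1
        rw [List.filter_map]
        congr 2
      -- ids of the head key
      have hids : pvIdsOf k ((k, r) :: t) = r :: pvIdsOf k t := by
        simp [pvIdsOf]
      -- head singleton test ↔ pvSift's all-equal test
      have hiff : (PySem.Set.ofList ((pvIdsOf k t).filter (fun y => !(y == r)))).length = 0
          ↔ ((t.filter (fun kr => kr.1 == k)).all (fun kr => kr.2 == r)) = true := by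
        rw [List.length_eq_zero_iff, pvOfListNil, List.filter_eq_nil_iff]
        constructor
        · intro hnil
          rw [List.all_eq_true]
          intro kr hkr
          have hmem : kr.2 ∈ pvIdsOf k t := List.mem_map.2 ⟨kr, hkr, rfl⟩
          have := hnil kr.2 hmem
          simpa using this
        · intro hall a ha
          obtain ⟨kr, hkr, hsnd⟩ := List.mem_map.1 ha
          have := (List.all_eq_true.1 hall) kr hkr
          simp only [beq_iff_eq] at this
          simp [← hsnd, this]
      have hcond : ((PySem.Set.ofList (pvIdsOf k ((k, r) :: t))).length == 1)
          = (t.filter (fun kr => kr.1 == k)).all (fun kr => kr.2 == r) := by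
        rw [hids, pvOfListCons, List.length_cons]
        cases hc : (t.filter (fun kr => kr.1 == k)).all (fun kr => kr.2 == r) with
        | true =>
          have h0 := hiff.2 hc
          rw [h0]
          rfl
        | false =>
          have h0 : (PySem.Set.ofList ((pvIdsOf k t).filter (fun y => !(y == r)))).length ≠ 0 := by
            intro h
            have := hiff.1 h
            rw [hc] at this
            cases this
          simp only [beq_eq_false_iff_ne, ne_eq]
          omega
      -- head emission
      have hemit : pvEmit ((k, r) :: t) k
          = (if (t.filter (fun kr => kr.1 == k)).all (fun kr => kr.2 == r)
             then some (k, r) else none) := by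
        unfold pvEmit
        rw [hcond, hids, pvOfListCons]
        split
        · rfl
        · rfl
      -- tail emissions coincide with pvAgood of the filtered tail
      have htail : (PySem.Set.ofList ((t.filter (fun kr => kr.1 != k)).map Prod.fst)).filterMap
            (pvEmit ((k, r) :: t))
          = pvAgood (t.filter (fun kr => kr.1 != k)) := by
        unfold pvAgood
        apply List.filterMap_congr
        intro k' hk'
        have hk't : k' ∈ (t.filter (fun kr => kr.1 != k)).map Prod.fst :=
          (PySem.Set.mem_ofList _ _).1 hk'
        have hne : k' ≠ k := by
          obtain ⟨kr, hkr, hfst⟩ := List.mem_map.1 hk't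
          have := (List.mem_filter.1 hkr).2
          simp only [bne_iff_ne, ne_eq] at this
          exact hfst ▸ this
        unfold pvEmit
        have h2 : pvIdsOf k' ((k, r) :: t) = pvIdsOf k' t := by
          unfold pvIdsOf
          rw [List.filter_cons]
          have : ((k, r).1 == k') = false := by
            simp only [beq_eq_false_iff_ne, ne_eq]
            intro he; exact hne he.symm
          simp [this]
        rw [h2, ← pvIdsFilterNe k k' t hne]
      have hsift : pvSift ((k, r) :: t)
          = if (t.filter (fun kr => kr.1 == k)).all (fun kr => kr.2 == r)
            then (k, r) :: pvSift (t.filter (fun kr => kr.1 != k))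
            else pvSift (t.filter (fun kr => kr.1 != k)) := by
        simp only [pvSift]
      -- assemble
      unfold pvAgood
      rw [hkeys, List.filterMap_cons, hemit, hsift]
      rw [show (PySem.Set.ofList ((t.filter (fun kr => kr.1 != k)).map Prod.fst)).filterMap
            (pvEmit ((k, r) :: t)) = pvAgood (t.filter (fun kr => kr.1 != k)) from htail]
      rw [ih _ hlen]
      cases hc : (t.filter (fun kr => kr.1 == k)).all (fun kr => kr.2 == r) <;> simp

-- ===== VERDICT (by name: the statement is the Claim_ definition above) =====
theorem build_unique_string_index_spec : Claim_equal_build_unique_string_index := by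
  intro rows _
  unfold Spec_build_unique_string_index build_unique_string_index_alt
  rw [pvCleanEq, List.nil_append, ← pvMainAux (rows.filterMap pvNormPair).length _ le_rfl]
  exact pvAoutEq rows
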